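-- pv_equiv track=rewrite | github.com/K1A2/algorithm_python | baekjoon/sort/1431_시리얼번호.py | nsort
-- ===== SOURCE A (Python) =====
-- def nsort(x, y):
--     if len(x) > len(y):
--         return 1
--     elif len(x) < len(y):
--         return -1
--     else:
--         a = b = 0
--         for i in x:
--             if '0' <= i <='9':
--                 a += int(i)
--         for i in y:
--             if '0' <= i <='9':
--                 b += int(i)
--         if a > b:
--             return 1
--         elif a < b:
--             return -1
--         else:
--             for i in range(len(x)):
--                 if x[i] > y[i]:
--                     return 1
--                 elif x[i] < y[i]:
--                     return -1
--             return 0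
-- ===== SOURCE B (Python) =====
-- def nsort(x, y):
--     # Single fused pass over the zipped characters: one accumulator holds the
--     # running digit-sum difference and the first lexicographic mismatch sign.
--     if len(x) != len(y):
--         return 1 if len(x) > len(y) else -1
--     dsum = 0
--     lex = 0
--     for cx, cy in zip(x, y):
--         if '0' <= cx <= '9':
--             dsum += int(cx)
--         if '0' <= cy <= '9':
--             dsum -= int(cy)
--         if lex == 0 and cx != cy:
--             lex = 1 if cx > cy else -1
--     if dsum != 0:
--         return 1 if dsum > 0 else -1
--     return lex
-- ===== Notes on version B (the rewrite author's own statement) =====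
-- stated objective: alternative
-- what changed: Replaces A's three staged loops (a digit-sum loop over x, a second over y, then an index-by-index comparison loop) by a single fused pass over the zipped character pairs that maintains one running digit-sum difference and latches the sign of the first lexicographic mismatch, deciding from that accumulator at the end.
import Mathlib
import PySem

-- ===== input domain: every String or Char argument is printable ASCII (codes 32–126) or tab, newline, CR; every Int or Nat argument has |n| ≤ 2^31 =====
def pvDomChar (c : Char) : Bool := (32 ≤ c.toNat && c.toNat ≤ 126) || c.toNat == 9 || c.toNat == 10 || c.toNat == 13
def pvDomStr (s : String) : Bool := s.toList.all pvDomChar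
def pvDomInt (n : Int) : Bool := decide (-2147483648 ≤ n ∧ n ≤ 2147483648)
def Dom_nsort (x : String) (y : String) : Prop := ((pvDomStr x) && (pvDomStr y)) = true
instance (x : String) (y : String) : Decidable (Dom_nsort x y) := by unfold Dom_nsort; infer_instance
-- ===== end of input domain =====

-- B replaces A's three staged loops by ONE fused pass over the zipped characters
-- maintaining the running digit-sum difference and the first mismatch sign (alternative).

-- ===== PORT A =====
-- the digit test '0' <= i <= '9' and int(i)
def pvIsDigit (c : Char) : Bool := '0' ≤ c && c ≤ '9'
def pvDigVal (c : Char) : Int := (c.toNat : Int) - 48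

-- the 'for i in x: if '0' <= i <= '9': a += int(i)' loop
def pvDigLoopA (cs : List Char) (a : Int) : Int :=
  cs.foldl (fun a c => if pvIsDigit c then a + pvDigVal c else a) a

-- the 'for i in range(len(x))' comparison loop (x and y have equal length here)
def pvLexA : List Char → List Char → Int
  | c :: cs, d :: ds => if c > d then 1 else if c < d then -1 else pvLexA cs ds
  | _, _ => 0

def nsort (x : String) (y : String) : Int :=
  let xs := x.toList
  let ys := y.toList
  if xs.length > ys.length then 1
  else if xs.length < ys.length then -1
  else
    let a := pvDigLoopA xs 0
    let b := pvDigLoopA ys 0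
    if a > b then 1
    else if a < b then -1
    else pvLexA xs ys

-- ===== PORT B =====
-- one loop body of Source B: update (dsum, lex) from the pair (cx, cy)
def pvStepB (st : Int × Int) (p : Char × Char) : Int × Int :=
  let d1 := if pvIsDigit p.1 then st.1 + pvDigVal p.1 else st.1
  let d2 := if pvIsDigit p.2 then d1 - pvDigVal p.2 else d1
  let l  := if st.2 == 0 && p.1 != p.2 then (if p.2 < p.1 then (1 : Int) else -1) else st.2
  (d2, l)

def nsort_alt (x : String) (y : String) : Int :=
  let cs := x.toList
  let ds := y.toList
  if cs.length ≠ ds.length then (if ds.length < cs.length then 1 else -1)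
  else
    let r := (cs.zip ds).foldl pvStepB (0, 0)
    if r.1 ≠ 0 then (if 0 < r.1 then 1 else -1) else r.2

-- ===== PRECONDITION & SPEC =====
def Spec_nsort (x : String) (y : String) (out : Int) : Prop := out = nsort_alt x y
instance (x : String) (y : String) (out : Int) : Decidable (Spec_nsort x y out) := by unfold Spec_nsort; infer_instance

-- ===== CLAIM (what is proved, stated in full; the proofs are below) =====
def Claim_equal_nsort : Prop := ∀ (x : String) (y : String), Dom_nsort x y → Spec_nsort x y (nsort x y)

-- ===== LEMMAS AND PROOFS =====
-- the digit sum of a list, the common value of A's loop and B's running difference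
def pvDS (cs : List Char) : Int := ((cs.filter pvIsDigit).map pvDigVal).sum

theorem pvDigLoopA_eq (cs : List Char) (a : Int) :
    pvDigLoopA cs a = a + pvDS cs := by
  induction cs generalizing a with
  | nil => simp [pvDigLoopA, pvDS]
  | cons c cs ih =>
    have step : pvDigLoopA (c :: cs) a = pvDigLoopA cs (if pvIsDigit c then a + pvDigVal c else a) := rfl
    rw [step, ih]
    by_cases h : pvIsDigit c <;> simp [pvDS, h] <;> ring

-- B's fused fold, on equal-length lists, computes the digit-sum difference and A's lex loop
theorem pvFoldB_eq (cs : List Char) (ds : List Char) (h : cs.length = ds.length)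
    (d0 l0 : Int) :
    (cs.zip ds).foldl pvStepB (d0, l0) =
      (d0 + pvDS cs - pvDS ds, if l0 = 0 then pvLexA cs ds else l0) := by
  induction cs generalizing ds d0 l0 with
  | nil =>
    cases ds with
    | nil => simp [pvDS, pvLexA]
    | cons d ds => simp at h
  | cons c cs ih =>
    cases ds with
    | nil => simp at h
    | cons d ds =>
      simp only [List.length_cons, Nat.add_right_cancel_iff] at h
      have : (c :: cs).zip (d :: ds) = (c, d) :: cs.zip ds := rfl
      rw [this, List.foldl_cons, ih ds h]
      rcases lt_trichotomy c d with hlt | heq | hgt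
      · have hne : c ≠ d := ne_of_lt hlt
        by_cases hl0 : l0 = 0
        · simp [pvStepB, pvLexA, pvDS, hl0, hne, hlt, not_lt_of_gt hlt]
          by_cases h1 : pvIsDigit c <;> by_cases h2 : pvIsDigit d <;> simp [h1, h2] <;> ring
        · simp [pvStepB, pvDS, hl0, hne]
          by_cases h1 : pvIsDigit c <;> by_cases h2 : pvIsDigit d <;> simp [h1, h2] <;> ring
      · subst heq
        simp [pvStepB, pvLexA, pvDS]
        by_cases h1 : pvIsDigit c <;> simp [h1] <;> ring
      · have hne : c ≠ d := ne_of_gt hgt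
        by_cases hl0 : l0 = 0
        · simp [pvStepB, pvLexA, pvDS, hl0, hne, hgt]
          by_cases h1 : pvIsDigit c <;> by_cases h2 : pvIsDigit d <;> simp [h1, h2] <;> ring
        · simp [pvStepB, pvDS, hl0, hne]
          by_cases h1 : pvIsDigit c <;> by_cases h2 : pvIsDigit d <;> simp [h1, h2] <;> ring

-- ===== VERDICT (by name: the statement is the Claim_ definition above) =====
theorem nsort_spec : Claim_equal_nsort := by
  intro x y _
  show nsort x y = nsort_alt x y
  unfold nsort nsort_alt
  simp only []
  set cs := x.toList with hcs
  set ds := y.toList with hds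
  by_cases h : cs.length = ds.length
  · rw [pvFoldB_eq cs ds h]
    simp only [h, pvDigLoopA_eq, zero_add, lt_irrefl, ne_eq,
      not_true_eq_false, if_false]
    split_ifs <;> omega
  · split_ifs <;> omega
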